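-- pv_equiv track=rewrite | github.com/jaroslavh/ceres | cluster_represent/crs.py | find_biggest_neighbourhood_node
-- ===== SOURCE A (Python) =====
-- def find_biggest_neighbourhood_node(neigh_graph, covered):
--     """Find samples from neighborhood graph with highest number of neighbors.
--
--     :param neigh_graph: neighborhood graph dictionary with each key representing one node
--     and value containing its neighbors
--     :return: list of nodes with highest number of neighbors
--     """
--     max_size = 0
--     biggest = []
--     for key, val in neigh_graph.items():
--         if key not in covered:
--             cur_size = len(val)
--             if cur_size > max_size:
--                 biggest = []
--                 max_size = cur_size
--                 biggest.append(key)
--             elif cur_size == max_size: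
--                 biggest.append(key)
--     return biggest
-- ===== SOURCE B (Python) =====
-- def find_biggest_neighbourhood_node(neigh_graph, covered):
--     """Find samples from neighborhood graph with highest number of neighbors."""
--     max_size = max((len(val) for key, val in neigh_graph.items() if key not in covered),
--                    default=0)
--     return [key for key, val in neigh_graph.items()
--             if key not in covered and len(val) == max_size]
-- ===== Notes on version B (the rewrite author's own statement) =====
-- stated objective: simpler
-- what changed: Replaced the single stateful loop that tracks a running maximum and resets/extends an accumulator list by two declarative passes: compute max_size with max(..., default=0) over uncovered nodes, then collect matching keys with a list comprehension.
import Mathlib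
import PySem

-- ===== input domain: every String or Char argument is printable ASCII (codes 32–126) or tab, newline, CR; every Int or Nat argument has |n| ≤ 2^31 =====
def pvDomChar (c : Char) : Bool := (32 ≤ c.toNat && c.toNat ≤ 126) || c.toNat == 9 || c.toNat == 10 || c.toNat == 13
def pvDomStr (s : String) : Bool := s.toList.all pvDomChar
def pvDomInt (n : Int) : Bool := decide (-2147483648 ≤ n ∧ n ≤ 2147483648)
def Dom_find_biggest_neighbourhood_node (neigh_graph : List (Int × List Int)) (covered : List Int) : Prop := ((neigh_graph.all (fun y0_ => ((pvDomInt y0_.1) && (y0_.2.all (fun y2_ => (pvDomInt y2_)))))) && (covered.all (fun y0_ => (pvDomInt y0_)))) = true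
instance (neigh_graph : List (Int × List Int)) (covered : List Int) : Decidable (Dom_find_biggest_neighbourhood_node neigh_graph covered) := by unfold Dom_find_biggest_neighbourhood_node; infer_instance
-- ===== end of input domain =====

-- B replaces A's single stateful loop (running max + reset/extend accumulator) by two
-- declarative passes: max(..., default=0) over uncovered nodes, then a list comprehension;
-- objective: simpler.

-- ===== PORT A =====
-- literal transliteration of A's loop: state = (max_size, biggest)
def find_biggest_neighbourhood_node (neigh_graph : List (Int × List Int)) (covered : List Int) : List Int :=
  (neigh_graph.foldl
    (fun (st : Int × List Int) p =>
      if !(covered.contains p.1) then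
        let cur_size : Int := p.2.length
        if cur_size > st.1 then (cur_size, [p.1])
        else if cur_size == st.1 then (st.1, st.2 ++ [p.1])
        else st
      else st)
    (0, [])).2

-- ===== PORT B =====
-- max_size = max((len(val) for key,val in items if key not in covered), default=0);
-- then a comprehension collecting matching keys
def find_biggest_neighbourhood_node_alt (neigh_graph : List (Int × List Int)) (covered : List Int) : List Int :=
  let max_size : Int :=
    PySem.List.maxD
      ((neigh_graph.filter (fun p => !(covered.contains p.1))).map (fun p => (p.2.length : Int)))
      (fun x => x) 0
  (neigh_graph.filter (fun p => !(covered.contains p.1) && (p.2.length : Int) == max_size)).map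
    (fun p => p.1)

-- ===== PRECONDITION & SPEC =====
def Spec_find_biggest_neighbourhood_node (neigh_graph : List (Int × List Int)) (covered : List Int) (out : List Int) : Prop := out = find_biggest_neighbourhood_node_alt neigh_graph covered
instance (neigh_graph : List (Int × List Int)) (covered : List Int) (out : List Int) : Decidable (Spec_find_biggest_neighbourhood_node neigh_graph covered out) := by unfold Spec_find_biggest_neighbourhood_node; infer_instance

-- ===== CLAIM (what is proved, stated in full; the proofs are below) =====
def Claim_equal_find_biggest_neighbourhood_node : Prop := ∀ (neigh_graph : List (Int × List Int)) (covered : List Int), Dom_find_biggest_neighbourhood_node neigh_graph covered → Spec_find_biggest_neighbourhood_node neigh_graph covered (find_biggest_neighbourhood_node neigh_graph covered)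

-- ===== LEMMAS AND PROOFS =====

-- the running maximum of the uncovered neighbourhood sizes over a prefix
def pvRunMax (covered : List Int) (g : List (Int × List Int)) : Int :=
  ((g.filter (fun p => !(covered.contains p.1))).map (fun p => (p.2.length : Int))).foldl max 0

-- the keys collected so far, characterised declaratively
def pvColl (covered : List Int) (g : List (Int × List Int)) : List Int :=
  (g.filter (fun p => !(covered.contains p.1) && (p.2.length : Int) == pvRunMax covered g)).map
    (fun p => p.1)

lemma pvRunMax_le (covered : List Int) (g : List (Int × List Int)) (p : Int × List Int)
    (hp : p ∈ g) (hk : p.1 ∉ covered) :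
    (p.2.length : Int) ≤ pvRunMax covered g := by
  apply (PySem.List.le_foldl_max _ 0).2
  apply List.mem_map_of_mem
  apply List.mem_filter.2
  exact ⟨hp, by simp [hk]⟩

lemma pvRunMax_append (covered : List Int) (g : List (Int × List Int)) (x : Int × List Int) :
    pvRunMax covered (g ++ [x]) =
      if x.1 ∈ covered then pvRunMax covered g
      else max (pvRunMax covered g) (x.2.length : Int) := by
  unfold pvRunMax
  by_cases hk : x.1 ∈ covered <;>
    simp [List.filter_append, hk, List.foldl_append]

-- the loop invariant: A's fold state over a prefix g is (running max, collected keys)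
lemma loop_inv (covered : List Int) (g : List (Int × List Int)) :
    g.foldl
      (fun (st : Int × List Int) p =>
        if !(covered.contains p.1) then
          let cur_size : Int := p.2.length
          if cur_size > st.1 then (cur_size, [p.1])
          else if cur_size == st.1 then (st.1, st.2 ++ [p.1])
          else st
        else st)
      (0, []) = (pvRunMax covered g, pvColl covered g) := by
  induction g using List.reverseRecOn with
  | nil => simp [pvRunMax, pvColl]
  | append_singleton g x ih =>
    rw [List.foldl_append, ih]
    simp only [List.foldl_cons, List.foldl_nil]
    by_cases hk : x.1 ∈ covered
    · -- covered: state unchanged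
      have hmax : pvRunMax covered (g ++ [x]) = pvRunMax covered g := by
        rw [pvRunMax_append]; simp [hk]
      have hcoll : pvColl covered (g ++ [x]) = pvColl covered g := by
        unfold pvColl
        rw [List.filter_append, hmax]
        simp [hk]
      simp [hk, hmax, hcoll]
    · rcases lt_trichotomy (pvRunMax covered g) ((x.2.length : Int)) with hlt | heq | hgt
      · -- a new strict maximum: the collected list resets to [x.1]
        have hmax : pvRunMax covered (g ++ [x]) = (x.2.length : Int) := by
          rw [pvRunMax_append]; simp [hk, max_eq_right (le_of_lt hlt)]
        have hcoll : pvColl covered (g ++ [x]) = [x.1] := by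
          unfold pvColl
          rw [List.filter_append, hmax]
          have hnil : g.filter
              (fun p => !(covered.contains p.1) && (p.2.length : Int) == (x.2.length : Int)) = [] := by
            apply List.filter_eq_nil_iff.2
            intro p hp
            by_cases hkp : p.1 ∈ covered
            · simp [hkp]
            · have := pvRunMax_le covered g p hp hkp
              simp only [Bool.and_eq_true, beq_iff_eq, not_and]
              intro _
              omega
          rw [hnil]
          simp [hk]
        simp [hk, hmax, hcoll, hlt]
      · -- a tie: x.1 is appended
        have hmax : pvRunMax covered (g ++ [x]) = pvRunMax covered g := by
          rw [pvRunMax_append]; simp [hk, max_eq_left (le_of_eq heq.symm)]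
        have hcoll : pvColl covered (g ++ [x]) = pvColl covered g ++ [x.1] := by
          unfold pvColl
          rw [List.filter_append, hmax]
          simp [hk, heq]
        simp [hk, hmax, hcoll, heq]
      · -- strictly smaller: state unchanged
        have hmax : pvRunMax covered (g ++ [x]) = pvRunMax covered g := by
          rw [pvRunMax_append]; simp [hk, max_eq_left (le_of_lt hgt)]
        have hcoll : pvColl covered (g ++ [x]) = pvColl covered g := by
          unfold pvColl
          rw [List.filter_append, hmax]
          simp [hk, (ne_of_lt hgt : (x.2.length : Int) ≠ pvRunMax covered g)]
        rw [hmax, hcoll]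
        have h1 : ¬ ((x.2.length : Int) > pvRunMax covered g) := not_lt.2 (le_of_lt hgt)
        simp [hk, h1, (ne_of_lt hgt : (x.2.length : Int) ≠ pvRunMax covered g)]

-- B's max(..., default=0) agrees with the running-max fold, because all sizes are ≥ 0
lemma maxD_eq_foldl (l : List Int) (h : ∀ x ∈ l, 0 ≤ x) :
    PySem.List.maxD l (fun x => x) 0 = l.foldl max 0 := by
  cases l with
  | nil =>
    have : PySem.List.max? ([] : List Int) (fun x => x) = none :=
      (PySem.List.max?_eq_none_iff _ _).2 rfl
    simp [PySem.List.maxD, this]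
  | cons x t =>
    unfold PySem.List.maxD
    rw [PySem.List.max?_id_cons]
    have hx : max 0 x = x := max_eq_right (h x (List.mem_cons_self))
    simp [List.foldl_cons, hx]

-- ===== VERDICT (by name: the statement is the Claim_ definition above) =====
theorem find_biggest_neighbourhood_node_spec : Claim_equal_find_biggest_neighbourhood_node := by
  intro g covered _
  unfold Spec_find_biggest_neighbourhood_node
  unfold find_biggest_neighbourhood_node find_biggest_neighbourhood_node_alt
  rw [loop_inv]
  have hmax : PySem.List.maxD
      ((g.filter (fun p => !(covered.contains p.1))).map (fun p => (p.2.length : Int)))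
      (fun x => x) 0 = pvRunMax covered g := by
    apply maxD_eq_foldl
    intro x hx
    rcases List.mem_map.1 hx with ⟨p, _, rfl⟩
    exact Int.natCast_nonneg _
  simp only [hmax]
  rfl
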